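-- pv_equiv track=rewrite | github.com/Madhu-M2611/PhantomGuard | agent/src/modules/detector.py | _detect_suspicious_processes
-- ===== SOURCE A (Python) =====
-- from typing import Dict, List, Optional, Any, Tuple
--
-- def _detect_suspicious_processes(processes: List[Dict]) -> List[Dict]:
--     """Detect suspicious processes"""
--     suspicious = []
--
--     # Known suspicious process patterns
--     suspicious_patterns = [
--         'ransomware',
--         'encrypt',
--         'malware',
--         'trojan',
--         'virus'
--     ]
--
--     for proc in processes:
--         proc_name = proc.get('name', '').lower()
--         for pattern in suspicious_patterns:
--             if pattern in proc_name:
--                 suspicious.append(proc)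
--                 break
--
--     return suspicious
-- ===== SOURCE B (Python) =====
-- from typing import Dict, List
--
-- _KEYWORDS = ('ransomware', 'encrypt', 'malware', 'trojan', 'virus')
--
--
-- def _scan(name: str) -> bool:
--     # single left-to-right scan: at each position check whether a keyword starts there
--     for i in range(len(name)):
--         for kw in _KEYWORDS:
--             if name.startswith(kw, i):
--                 return True
--     return False
--
--
-- def _detect_suspicious_processes(processes: List[Dict]) -> List[Dict]:
--     return [proc for proc in processes if _scan(proc.get('name', '').lower())]
-- ===== Notes on version B (the rewrite author's own statement) =====
-- stated objective: alternative
-- what changed: Replaces the per-pattern substring searches (one full scan of the name per keyword, with break) by one positional left-to-right scan that at each index checks whether any keyword starts there, and builds the result as a comprehension/filter instead of an accumulator loop.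
import Mathlib
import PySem

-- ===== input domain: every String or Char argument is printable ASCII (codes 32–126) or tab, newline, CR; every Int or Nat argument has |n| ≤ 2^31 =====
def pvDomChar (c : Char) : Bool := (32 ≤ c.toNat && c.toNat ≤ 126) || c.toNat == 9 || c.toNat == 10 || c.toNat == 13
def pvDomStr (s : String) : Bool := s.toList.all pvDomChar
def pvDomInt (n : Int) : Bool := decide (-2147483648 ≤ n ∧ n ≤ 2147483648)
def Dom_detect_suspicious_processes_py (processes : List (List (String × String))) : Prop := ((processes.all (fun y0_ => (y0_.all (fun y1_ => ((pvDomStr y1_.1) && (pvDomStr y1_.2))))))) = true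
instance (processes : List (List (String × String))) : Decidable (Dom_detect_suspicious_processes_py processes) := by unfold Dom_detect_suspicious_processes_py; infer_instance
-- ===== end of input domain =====

-- B replaces A's per-keyword substring searches by one positional scan of the name
-- (at each index, does some keyword start here?) and a filter instead of an accumulator loop.

-- ===== PORT A =====
def pvPatternsA : List String := ["ransomware", "encrypt", "malware", "trojan", "virus"]

-- inner 'for pattern in suspicious_patterns: if pattern in proc_name: append; break'
def pvInnerA (name : String) : List String → Bool
  | [] => false
  | p :: ps => if PySem.Str.isIn p name then true else pvInnerA name ps

def detect_suspicious_processes_py (processes : List (List (String × String))) : List (List (String × String)) :=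
  processes.foldl (fun suspicious proc =>
    let proc_name := PySem.Str.lower ((PySem.Dict.mk proc).getD "name" "")
    if pvInnerA proc_name pvPatternsA then suspicious ++ [proc] else suspicious) []

-- ===== PORT B =====
def pvKeywordsB : List (List Char) :=
  ["ransomware".toList, "encrypt".toList, "malware".toList, "trojan".toList, "virus".toList]

-- Source B's _scan: for i in range(len(name)): for kw in KEYWORDS: if name.startswith(kw, i): return True
def pvScanB (name : String) : Bool :=
  let cs := name.toList
  (List.range cs.length).any (fun i => pvKeywordsB.any (fun kw => PySem.Chars.startswith (cs.drop i) kw))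

def detect_suspicious_processes_py_alt (processes : List (List (String × String))) : List (List (String × String)) :=
  processes.filter (fun proc => pvScanB (PySem.Str.lower ((PySem.Dict.mk proc).getD "name" "")))

-- ===== PRECONDITION & SPEC =====
def Spec_detect_suspicious_processes_py (processes : List (List (String × String))) (out : List (List (String × String))) : Prop := out = detect_suspicious_processes_py_alt processes
instance (processes : List (List (String × String))) (out : List (List (String × String))) : Decidable (Spec_detect_suspicious_processes_py processes out) := by unfold Spec_detect_suspicious_processes_py; infer_instance

-- ===== CLAIM (what is proved, stated in full; the proofs are below) =====
def Claim_equal_detect_suspicious_processes_py : Prop := ∀ (processes : List (List (String × String))), Dom_detect_suspicious_processes_py processes → Spec_detect_suspicious_processes_py processes (detect_suspicious_processes_py processes)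

-- ===== LEMMAS AND PROOFS =====

-- a nonempty prefix of a drop forces the drop index inside the list
lemma pv_prefix_drop_lt (cs kw : List Char) (h : kw ≠ []) (j : Nat) (hp : kw <+: cs.drop j) :
    j < cs.length := by
  by_contra hlt
  have hd : cs.drop j = [] := List.drop_eq_nil_of_le (by omega)
  rw [hd, List.prefix_nil] at hp
  exact h hp

-- B's positional scan finds exactly the names containing some keyword
lemma pv_scan_iff (cs : List Char) :
    ((List.range cs.length).any fun i => pvKeywordsB.any fun kw => PySem.Chars.startswith (cs.drop i) kw) = true
      ↔ ∃ kw ∈ pvKeywordsB, PySem.Chars.isIn kw cs = true := by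
  simp only [List.any_eq_true, List.mem_range, PySem.Chars.startswith_iff]
  constructor
  · rintro ⟨i, _, kw, hkw, hp⟩
    exact ⟨kw, hkw, (PySem.Chars.exists_prefix_drop_iff_isIn kw cs).1 ⟨i, hp⟩⟩
  · rintro ⟨kw, hkw, hin⟩
    obtain ⟨j, hp⟩ := (PySem.Chars.exists_prefix_drop_iff_isIn kw cs).2 hin
    have hne : kw ≠ [] := by
      fin_cases hkw <;> simp
    exact ⟨j, pv_prefix_drop_lt cs kw hne j hp, kw, hkw, hp⟩

-- A's inner break-loop is the same containment test
lemma pv_innerA_iff (name : String) (ps : List String) :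
    pvInnerA name ps = true ↔ ∃ p ∈ ps, PySem.Str.isIn p name = true := by
  induction ps with
  | nil => simp [pvInnerA]
  | cons p ps ih =>
      by_cases h : PySem.Chars.isIn p.toList name.toList = true
      · simp [pvInnerA, PySem.Str.isIn_eq, h]
      · simp [pvInnerA, PySem.Str.isIn_eq, h, ih]

-- the per-process predicates of the two ports coincide
lemma pv_pred_eq (name : String) : pvInnerA name pvPatternsA = pvScanB name := by
  rw [Bool.eq_iff_iff, pv_innerA_iff, pvScanB, pv_scan_iff]
  constructor
  · rintro ⟨p, hp, hin⟩
    refine ⟨p.toList, ?_, ?_⟩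
    · fin_cases hp <;> simp [pvKeywordsB]
    · rw [PySem.Str.isIn_eq] at hin; exact hin
  · rintro ⟨kw, hkw, hin⟩
    fin_cases hkw <;>
      first
      | exact ⟨"ransomware", by simp [pvPatternsA], by rw [PySem.Str.isIn_eq]; exact hin⟩
      | exact ⟨"encrypt", by simp [pvPatternsA], by rw [PySem.Str.isIn_eq]; exact hin⟩
      | exact ⟨"malware", by simp [pvPatternsA], by rw [PySem.Str.isIn_eq]; exact hin⟩
      | exact ⟨"trojan", by simp [pvPatternsA], by rw [PySem.Str.isIn_eq]; exact hin⟩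
      | exact ⟨"virus", by simp [pvPatternsA], by rw [PySem.Str.isIn_eq]; exact hin⟩

-- ===== VERDICT (by name: the statement is the Claim_ definition above) =====
theorem detect_suspicious_processes_py_spec : Claim_equal_detect_suspicious_processes_py := by
  intro processes _
  show detect_suspicious_processes_py processes = detect_suspicious_processes_py_alt processes
  show List.foldl
      (fun suspicious proc =>
        if pvInnerA (PySem.Str.lower ((PySem.Dict.mk proc).getD "name" "")) pvPatternsA = true
        then suspicious ++ [id proc] else suspicious)
      [] processes
    = detect_suspicious_processes_py_alt processes
  rw [PySem.List.foldl_append_if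
    (fun proc => pvInnerA (PySem.Str.lower ((PySem.Dict.mk proc).getD "name" "")) pvPatternsA)
    id processes []]
  unfold detect_suspicious_processes_py_alt
  simp only [List.map_id, List.nil_append]
  congr 1
  funext proc
  exact pv_pred_eq _
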